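-- pv_equiv track=rewrite | github.com/rituraj1314/VRV-Security-Assignment | log.py | find_most_accessed_endpoint
-- ===== SOURCE A (Python) =====
-- from collections import defaultdict
-- from typing import List, Dict, Tuple, Optional
--
-- def find_most_accessed_endpoint(log_entries: List[Dict[str, str]]) -> Optional[Tuple[str, int]]:
--     endpoint_counts = defaultdict(int)
--     for entry in log_entries:
--         if entry['status_code'] == '200':
--             endpoint_counts[entry['endpoint']] += 1
--     if not endpoint_counts:
--         return ("/", 0)
--     return max(endpoint_counts.items(), key=lambda x: x[1])
-- ===== SOURCE B (Python) =====
-- def find_most_accessed_endpoint(log_entries):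
--     eps = [e['endpoint'] for e in log_entries if e['status_code'] == '200']
--     if not eps:
--         return ("/", 0)
--     seen = []
--     for ep in eps:
--         if ep not in seen:
--             seen.append(ep)
--     best, best_c = seen[0], eps.count(seen[0])
--     for ep in seen[1:]:
--         c = eps.count(ep)
--         if c > best_c:
--             best, best_c = ep, c
--     return (best, best_c)
-- ===== Notes on version B (the rewrite author's own statement) =====
-- stated objective: alternative
-- what changed: B drops the dict entirely: it extracts the status-200 endpoint list, dedups it into a first-occurrence list, recounts each distinct endpoint with list.count and keeps a running best under strict >, which reproduces max's first-in-insertion-order tie-break.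
import Mathlib
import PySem

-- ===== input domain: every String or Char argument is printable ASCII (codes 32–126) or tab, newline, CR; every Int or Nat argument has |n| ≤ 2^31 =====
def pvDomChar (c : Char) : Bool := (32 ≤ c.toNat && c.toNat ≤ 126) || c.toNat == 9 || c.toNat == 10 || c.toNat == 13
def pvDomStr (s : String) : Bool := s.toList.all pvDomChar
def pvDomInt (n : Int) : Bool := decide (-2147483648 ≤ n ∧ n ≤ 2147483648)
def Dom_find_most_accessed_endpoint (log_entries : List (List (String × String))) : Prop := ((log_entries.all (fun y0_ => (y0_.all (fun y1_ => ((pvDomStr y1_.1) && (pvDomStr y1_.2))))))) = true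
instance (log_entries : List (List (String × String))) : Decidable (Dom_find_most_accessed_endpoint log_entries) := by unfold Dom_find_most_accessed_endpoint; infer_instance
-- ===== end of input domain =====

-- B drops A's dict+max scan: it dedups the status-200 endpoint list into first-occurrence
-- order and recounts each distinct endpoint with list.count, keeping a running best (strict >).

-- ===== PORT A =====
def find_most_accessed_endpoint (log_entries : List (List (String × String))) : String × Int :=
  -- endpoint_counts = defaultdict(int); for entry: if entry['status_code'] == '200': counts[entry['endpoint']] += 1
  -- (entry['k'] is a dict lookup; Pre_ guarantees the keys are present, so getD returns the looked-up value)
  let endpoint_counts : PySem.Dict String Int :=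
    log_entries.foldl (fun d entry =>
      if (PySem.Dict.mk entry).getD "status_code" "" == "200" then
        d.modify ((PySem.Dict.mk entry).getD "endpoint" "") 0 (· + 1)
      else d) PySem.Dict.empty
  if endpoint_counts.items.isEmpty then ("/", 0)
  else
    -- max(endpoint_counts.items(), key=lambda x: x[1])  (nonempty here, so max? is some)
    match PySem.List.max? endpoint_counts.items (fun x => x.2) with
    | some m => m
    | none => ("/", 0)

-- ===== PORT B =====
def find_most_accessed_endpoint_alt (log_entries : List (List (String × String))) : String × Int :=
  -- eps = [e['endpoint'] for e in log_entries if e['status_code'] == '200']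
  let eps : List String :=
    (log_entries.filter (fun e => (PySem.Dict.mk e).getD "status_code" "" == "200")).map
      (fun e => (PySem.Dict.mk e).getD "endpoint" "")
  match eps with
  | [] => ("/", 0)                     -- if not eps: return ("/", 0)
  | _ :: _ =>
    -- seen = []; for ep in eps: if ep not in seen: seen.append(ep)
    let seen : List String :=
      eps.foldl (fun s ep => if s.contains ep then s else s ++ [ep]) []
    match seen with
    | [] => ("/", 0)                   -- unreachable: eps nonempty
    | s0 :: rest =>
      -- best, best_c = seen[0], eps.count(seen[0]); for ep in seen[1:]: c = eps.count(ep); if c > best_c: …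
      rest.foldl (fun best ep =>
        let c : Int := PySem.List.count eps ep
        if best.2 < c then (ep, c) else best)
        (s0, (PySem.List.count eps s0 : Int))

-- ===== PRECONDITION & SPEC =====
-- Pre_ excludes exactly the inputs where A raises KeyError: an entry without 'status_code',
-- or a status-200 entry without 'endpoint'.
def Pre_find_most_accessed_endpoint (log_entries : List (List (String × String))) : Prop :=
  ∀ entry ∈ log_entries,
    (PySem.Dict.mk entry).contains "status_code" = true ∧
    ((PySem.Dict.mk entry).getD "status_code" "" = "200" →
      (PySem.Dict.mk entry).contains "endpoint" = true)
instance (log_entries : List (List (String × String))) : Decidable (Pre_find_most_accessed_endpoint log_entries) := by unfold Pre_find_most_accessed_endpoint; infer_instance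
def pvWitness_find_most_accessed_endpoint : (List (List (String × String))) :=
  [[("status_code", "200"), ("endpoint", "/home")], [("status_code", "404")]]

def Spec_find_most_accessed_endpoint (log_entries : List (List (String × String))) (out : String × Int) : Prop := out = find_most_accessed_endpoint_alt log_entries
instance (log_entries : List (List (String × String))) (out : String × Int) : Decidable (Spec_find_most_accessed_endpoint log_entries out) := by unfold Spec_find_most_accessed_endpoint; infer_instance

-- ===== CLAIM (what is proved, stated in full; the proofs are below) =====
def Claim_equal_find_most_accessed_endpoint : Prop := ∀ (log_entries : List (List (String × String))), Dom_find_most_accessed_endpoint log_entries → Pre_find_most_accessed_endpoint log_entries → Spec_find_most_accessed_endpoint log_entries (find_most_accessed_endpoint log_entries)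

-- ===== LEMMAS AND PROOFS =====

-- Python max(xs, key) on a nonempty list IS the running-maximum loop with strict >
theorem max?_cons_foldl {α κ : Type} [LinearOrder κ] (key : α → κ) (x : α) (t : List α) :
    PySem.List.max? (x :: t) key =
      some (t.foldl (fun m y => if key m < key y then y else m) x) := by
  induction t generalizing x with
  | nil => rfl
  | cons y t ih =>
    simp only [PySem.List.max?, List.foldl_cons] at ih ⊢
    by_cases h : key x < key y <;> simp [h, ih]

-- A's counting loop is Counter(eps) for B's eps list
theorem dictA_eq_counter (log_entries : List (List (String × String))) :
    (log_entries.foldl (fun d entry =>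
      if (PySem.Dict.mk entry).getD "status_code" "" == "200" then
        d.modify ((PySem.Dict.mk entry).getD "endpoint" "") 0 (· + 1)
      else d) PySem.Dict.empty : PySem.Dict String Int) =
    PySem.Dict.counter
      ((log_entries.filter (fun e => (PySem.Dict.mk e).getD "status_code" "" == "200")).map
        (fun e => (PySem.Dict.mk e).getD "endpoint" "")) := by
  rw [PySem.Dict.counter_eq_foldl, PySem.List.foldl_if_eq_foldl_filter, List.foldl_map]

-- B's dedup loop is Set.ofList
theorem seen_eq_ofList (eps : List String) :
    eps.foldl (fun s ep => if s.contains ep then s else s ++ [ep]) [] =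
      PySem.Set.ofList eps := by
  rw [PySem.Set.ofList_eq_foldl]; rfl

-- ===== VERDICT (by name: the statement is the Claim_ definition above) =====
theorem find_most_accessed_endpoint_spec : Claim_equal_find_most_accessed_endpoint := by
  intro L _ _
  unfold Spec_find_most_accessed_endpoint find_most_accessed_endpoint find_most_accessed_endpoint_alt
  simp only [dictA_eq_counter, PySem.Dict.items_counter, seen_eq_ofList]
  generalize ((L.filter (fun e => (PySem.Dict.mk e).getD "status_code" "" == "200")).map
      (fun e => (PySem.Dict.mk e).getD "endpoint" "")) = eps
  cases heps : eps with
  | nil => rfl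
  | cons e es =>
    have hmem : e ∈ PySem.Set.ofList (e :: es) := by
      rw [PySem.Set.mem_ofList]; exact List.mem_cons_self
    cases hS : PySem.Set.ofList (e :: es) with
    | nil => rw [hS] at hmem; exact absurd hmem (List.not_mem_nil)
    | cons s0 rest =>
      simp only [List.map_cons, List.isEmpty_cons, Bool.false_eq_true, if_false,
        max?_cons_foldl, List.foldl_map]
      rfl
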